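-- pv_equiv track=rewrite | github.com/amirnadaBGU/rl_hw2 | mains2.py | generate_cost_policy
-- ===== SOURCE A (Python) =====
-- from itertools import product, cycle
-- from itertools import product
--
-- COSTS = [-1, -4, -6, -2, -9]
--
-- def generate_states(num_states=5):
--     # Generates states
--     return list(product([True, False], repeat=num_states))
--
-- def generate_cost_policy(states=generate_states()):
--     # Function that generates cost policy (max(|cost|) job is chosen)
--     policy = {}
--     for state in states:
--         state_tuple = tuple(state)  # Use tuple as dictionary key
--         false_indices = [i for i, val in enumerate(state) if val == False]
--
--         if not false_indices:
--             policy[state_tuple] = [False] * len(state)  # No action possible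
--             continue
--
--         max_cost = 0
--         action_index = 0
--
--         for i in false_indices:
--             if COSTS[i] < max_cost:
--                 action_index = i
--                 max_cost = COSTS[i]
--
--         action = [False] * len(state)
--         action[action_index] = True
--         policy[state_tuple] = action
--     return policy
-- ===== SOURCE B (Python) =====
-- from itertools import product
--
-- COSTS = [-1, -4, -6, -2, -9]
--
-- def generate_states(num_states=5):
--     return list(product([True, False], repeat=num_states))
--
-- # job indices, cheapest (most negative) cost first: [4, 2, 1, 3, 0]
-- _ORDER = sorted(range(len(COSTS)), key=lambda i: COSTS[i])
--
-- def generate_cost_policy(states=generate_states()):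
--     policy = {}
--     for state in states:
--         action = [False] * len(state)
--         for i in _ORDER:
--             if i < len(state) and state[i] == False:
--                 action[i] = True
--                 break
--         policy[tuple(state)] = action
--     return policy
-- ===== Notes on version B (the rewrite author's own statement) =====
-- stated objective: alternative
-- what changed: B precomputes one priority list of job indices sorted by cost and, per state, takes the first still-available index from it, replacing A's per-state false-index collection plus running-min scan over COSTS.
import Mathlib
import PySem

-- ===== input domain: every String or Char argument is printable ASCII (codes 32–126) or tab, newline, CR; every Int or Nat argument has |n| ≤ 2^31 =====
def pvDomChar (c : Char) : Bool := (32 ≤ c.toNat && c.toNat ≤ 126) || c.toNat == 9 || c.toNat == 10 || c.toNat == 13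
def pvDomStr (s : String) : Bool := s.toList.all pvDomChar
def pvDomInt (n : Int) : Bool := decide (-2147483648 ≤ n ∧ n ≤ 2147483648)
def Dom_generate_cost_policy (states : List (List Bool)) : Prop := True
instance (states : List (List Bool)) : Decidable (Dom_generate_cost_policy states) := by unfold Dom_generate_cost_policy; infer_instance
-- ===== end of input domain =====

-- B replaces the per-state running-min scan over COSTS by one precomputed priority
-- list (indices sorted by cost) and a first-available lookup per state (objective: alternative).

-- ===== PORT A =====
def pvCOSTS : List Int := [-1, -4, -6, -2, -9]

def generate_cost_policy (states : List (List Bool)) : List (List Bool × List Bool) :=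
  (states.foldl (fun policy state =>
    let false_indices := ((PySem.List.enumerate state 0).filter (fun p => p.2 == false)).map (·.1)
    if false_indices.isEmpty then
      policy.insert state (List.replicate state.length false)
    else
      -- COSTS[i] is in range for every false index under Pre_; pyGetD's default is never used there
      let r := false_indices.foldl (fun (acc : Int × Int) i =>
        if PySem.List.pyGetD pvCOSTS i 0 < acc.1 then (PySem.List.pyGetD pvCOSTS i 0, i) else acc) (0, 0)
      policy.insert state (PySem.List.pySetD (List.replicate state.length false) r.2 true))
    PySem.Dict.empty).items

-- ===== PORT B =====
-- _ORDER = sorted(range(len(COSTS)), key=lambda i: COSTS[i])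
def pvORDER : List Int :=
  PySem.List.sorted (PySem.List.pyRange 0 5 1) (fun i => PySem.List.pyGetD pvCOSTS i 0) false

def generate_cost_policy_alt (states : List (List Bool)) : List (List Bool × List Bool) :=
  (states.foldl (fun policy state =>
    -- for i in _ORDER: take the first available i, set it, break
    let action :=
      match pvORDER.find? (fun i =>
          decide (i < (state.length : Int)) && (PySem.List.pyGet? state i == some false)) with
      | some i => PySem.List.pySetD (List.replicate state.length false) i true
      | none => List.replicate state.length false
    policy.insert state action)
    PySem.Dict.empty).items

-- ===== PRECONDITION & SPEC =====
-- Pre_ excludes states containing a False at an index ≥ 5: there A raises IndexError on COSTS[i].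
def Pre_generate_cost_policy (states : List (List Bool)) : Prop :=
  ∀ state ∈ states, (state.drop 5).all (fun b => b)
instance (states : List (List Bool)) : Decidable (Pre_generate_cost_policy states) := by
  unfold Pre_generate_cost_policy; infer_instance

def pvWitness_generate_cost_policy : List (List Bool) :=
  [[true, false, true, false, true], [true, true, true, true, true], [false, false], []]

def Spec_generate_cost_policy (states : List (List Bool)) (out : List (List Bool × List Bool)) : Prop := out = generate_cost_policy_alt states
instance (states : List (List Bool)) (out : List (List Bool × List Bool)) : Decidable (Spec_generate_cost_policy states out) := by unfold Spec_generate_cost_policy; infer_instance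

-- ===== CLAIM (what is proved, stated in full; the proofs are below) =====
def Claim_equal_generate_cost_policy : Prop := ∀ (states : List (List Bool)), Dom_generate_cost_policy states → Pre_generate_cost_policy states → Spec_generate_cost_policy states (generate_cost_policy states)

-- ===== LEMMAS AND PROOFS =====

-- false_indices of A, the per-job cost, and B's availability predicate, named for the proofs
def pvFI (state : List Bool) : List Int :=
  ((PySem.List.enumerate state 0).filter (fun p => p.2 == false)).map (·.1)
def pvCost (i : Int) : Int := PySem.List.pyGetD pvCOSTS i 0
def pvPred (state : List Bool) (i : Int) : Bool :=
  decide (i < (state.length : Int)) && (PySem.List.pyGet? state i == some false)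

theorem mem_FI_iff (state : List Bool) (i : Int) :
    i ∈ pvFI state ↔ ∃ k : Nat, ∃ h : k < state.length, i = (k : Int) ∧ state[k] = false := by
  simp [pvFI, List.mem_map, List.mem_filter, PySem.List.mem_enumerate_iff]

theorem pred_iff (state : List Bool) (i : Int) (h0 : 0 ≤ i) :
    pvPred state i = true ↔ i ∈ pvFI state := by
  obtain ⟨n, rfl⟩ := Int.eq_ofNat_of_zero_le h0
  simp [pvPred, mem_FI_iff, PySem.List.pyGet?_natCast, List.getElem?_eq_some_iff]

theorem FI_nonneg (state : List Bool) (i : Int) (h : i ∈ pvFI state) : 0 ≤ i := by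
  obtain ⟨k, hk, rfl, -⟩ := (mem_FI_iff state i).1 h; positivity

theorem FI_lt5 (state : List Bool) (hpre : ((state.drop 5).all (fun b => b)) = true)
    (i : Int) (h : i ∈ pvFI state) : i < 5 := by
  obtain ⟨k, hk, rfl, hv⟩ := (mem_FI_iff state i).1 h
  by_contra hge
  have h5 : 5 ≤ k := by omega
  have hd : k - 5 < (state.drop 5).length := by simp; omega
  have := (List.all_eq_true.1 hpre) (state.drop 5)[k-5] (by exact List.getElem_mem hd)
  rw [List.getElem_drop] at this
  simp_all [show 5 + (k-5) = k from by omega]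

theorem cost_neg (i : Int) (h0 : 0 ≤ i) (h5 : i < 5) : pvCost i < 0 := by
  have : i = 0 ∨ i = 1 ∨ i = 2 ∨ i = 3 ∨ i = 4 := by omega
  rcases this with rfl|rfl|rfl|rfl|rfl <;> decide

theorem cost_inj (a b : Int) (ha0 : 0 ≤ a) (ha5 : a < 5) (hb0 : 0 ≤ b) (hb5 : b < 5)
    (h : pvCost a = pvCost b) : a = b := by
  have h1 : a = 0 ∨ a = 1 ∨ a = 2 ∨ a = 3 ∨ a = 4 := by omega
  have h2 : b = 0 ∨ b = 1 ∨ b = 2 ∨ b = 3 ∨ b = 4 := by omega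
  rcases h1 with rfl|rfl|rfl|rfl|rfl <;> rcases h2 with rfl|rfl|rfl|rfl|rfl <;>
    first | rfl | (exact absurd h (by decide))

-- invariant of A's running-min fold: the result bounds every processed cost from
-- below and, unless it is the unchanged start value, names a member of the list
theorem foldA_inv (l : List Int) (acc : Int × Int) :
    (∀ i ∈ l, (l.foldl (fun acc i => if pvCost i < acc.1 then (pvCost i, i) else acc) acc).1 ≤ pvCost i) ∧
    ((l.foldl (fun acc i => if pvCost i < acc.1 then (pvCost i, i) else acc) acc) = acc ∨
      ((l.foldl (fun acc i => if pvCost i < acc.1 then (pvCost i, i) else acc) acc).2 ∈ l ∧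
       (l.foldl (fun acc i => if pvCost i < acc.1 then (pvCost i, i) else acc) acc).1 =
         pvCost (l.foldl (fun acc i => if pvCost i < acc.1 then (pvCost i, i) else acc) acc).2 ∧
       (l.foldl (fun acc i => if pvCost i < acc.1 then (pvCost i, i) else acc) acc).1 < acc.1)) := by
  induction l generalizing acc with
  | nil => simp
  | cons x t ih =>
    simp only [List.foldl_cons]
    by_cases hx : pvCost x < acc.1
    · simp only [if_pos hx]
      obtain ⟨hmin, hdisj⟩ := ih (pvCost x, x)
      refine ⟨?_, ?_⟩
      · intro i hi
        rcases List.mem_cons.1 hi with rfl | hit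
        · rcases hdisj with heq | ⟨-, -, hlt⟩
          · rw [heq]
          · exact le_of_lt hlt
        · exact hmin i hit
      · rcases hdisj with heq | ⟨hm, he, hlt⟩
        · right; rw [heq]; exact ⟨List.mem_cons_self, rfl, hx⟩
        · right; exact ⟨List.mem_cons_of_mem _ hm, he, lt_trans hlt hx⟩
    · simp only [if_neg hx]
      obtain ⟨hmin, hdisj⟩ := ih acc
      refine ⟨?_, ?_⟩
      · intro i hi
        rcases List.mem_cons.1 hi with rfl | hit
        · rcases hdisj with heq | ⟨-, -, hlt⟩
          · rw [heq]; omega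
          · omega
        · exact hmin i hit
      · rcases hdisj with heq | ⟨hm, he, hlt⟩
        · left; exact heq
        · right; exact ⟨List.mem_cons_of_mem _ hm, he, hlt⟩

theorem mem_ORDER (i : Int) (h0 : 0 ≤ i) (h5 : i < 5) : i ∈ pvORDER := by
  have : i = 0 ∨ i = 1 ∨ i = 2 ∨ i = 3 ∨ i = 4 := by omega
  rcases this with rfl|rfl|rfl|rfl|rfl <;> decide

theorem ORDER_eq : pvORDER = [4, 2, 1, 3, 0] := by decide

-- B's first hit in the priority list is available and of minimal cost among available jobs
theorem find?_spec (p : Int → Bool) (j : Int) (h : pvORDER.find? p = some j) :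
    p j = true ∧ ∀ i : Int, 0 ≤ i → i < 5 → p i = true → pvCost j ≤ pvCost i := by
  rw [ORDER_eq] at h
  cases h4 : p 4 <;> cases h2 : p 2 <;> cases h1 : p 1 <;> cases h3 : p 3 <;> cases h0 : p 0 <;>
    simp_all [List.find?] <;>
    (subst h
     intro i hi0 hi5 hp
     have : i = 0 ∨ i = 1 ∨ i = 2 ∨ i = 3 ∨ i = 4 := by omega
     rcases this with rfl|rfl|rfl|rfl|rfl <;> simp_all [pvCost, pvCOSTS, PySem.List.pyGetD])

-- per state, A's chosen action equals B's
theorem action_eq (state : List Bool) (hpre : (state.drop 5).all (fun b => b) = true) :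
    (if (pvFI state).isEmpty then List.replicate state.length false
     else PySem.List.pySetD (List.replicate state.length false)
       ((pvFI state).foldl (fun acc i => if pvCost i < acc.1 then (pvCost i, i) else acc) ((0:Int),(0:Int))).2 true)
    = (match pvORDER.find? (pvPred state) with
       | some i => PySem.List.pySetD (List.replicate state.length false) i true
       | none => List.replicate state.length false) := by
  rcases hf : pvORDER.find? (pvPred state) with _ | j
  · have hall := List.find?_eq_none.1 hf
    have hFI : pvFI state = [] := by
      rw [List.eq_nil_iff_forall_not_mem]
      intro x hx
      exact absurd ((pred_iff state x (FI_nonneg state x hx)).2 hx)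
        (by simpa using hall x (mem_ORDER x (FI_nonneg state x hx) (FI_lt5 state hpre x hx)))
    simp [hFI]
  · have hmem := List.mem_of_find?_eq_some hf
    have hj : 0 ≤ j ∧ j < 5 := by rw [ORDER_eq] at hmem; fin_cases hmem <;> norm_num
    have hpj : pvPred state j = true := List.find?_some hf
    have hjFI : j ∈ pvFI state := (pred_iff state j hj.1).1 hpj
    have hne : (pvFI state).isEmpty = false := by
      simp; exact List.ne_nil_of_mem hjFI
    rw [if_neg (by simp [hne])]
    obtain ⟨hmin, hdisj⟩ := foldA_inv (pvFI state) ((0:Int),(0:Int))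
    set r := (pvFI state).foldl (fun acc i => if pvCost i < acc.1 then (pvCost i, i) else acc) ((0:Int),(0:Int)) with hr
    have hrlt : r.1 < 0 := lt_of_le_of_lt (hmin j hjFI) (cost_neg j hj.1 hj.2)
    rcases hdisj with heq | ⟨hrm, hre, -⟩
    · rw [heq] at hrlt; norm_num at hrlt
    · have h0 : 0 ≤ r.2 := FI_nonneg state r.2 hrm
      have h5 : r.2 < 5 := FI_lt5 state hpre r.2 hrm
      have h1 : pvCost r.2 ≤ pvCost j := hre ▸ hmin j hjFI
      have h2 : pvCost j ≤ pvCost r.2 :=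
        (find?_spec (pvPred state) j hf).2 r.2 h0 h5 ((pred_iff state r.2 h0).2 hrm)
      rw [cost_inj r.2 j h0 h5 hj.1 hj.2 (le_antisymm h1 h2)]

-- ===== VERDICT (by name: the statement is the Claim_ definition above) =====
theorem generate_cost_policy_spec : Claim_equal_generate_cost_policy := by
  intro states _ hpre
  unfold Spec_generate_cost_policy generate_cost_policy generate_cost_policy_alt
  refine congrArg PySem.Dict.items ?_
  apply PySem.List.foldl_congr_mem'
  intro state hmem acc
  have h := action_eq state (hpre state hmem)
  simp only []
  rw [← apply_ite (fun a => acc.insert state a)]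
  exact congrArg (fun a => acc.insert state a) h
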